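-- pv_equiv track=rewrite | github.com/TheBiggerFish/ProjectEuler | Problem035/problem035.py | gen_rotations
-- ===== SOURCE A (Python) =====
-- from math import floor,log10
--
-- def gen_rotations(number):
--     digits = floor(log10(number))+1
--     rotations = set()
--     for _ in range(digits):
--         rotations.add(number)
--         last = number%10
--         number //= 10
--         number += last * 10**(digits-1)
--     return rotations
-- ===== SOURCE B (Python) =====
-- from math import floor, log10
--
-- def gen_rotations(number):
--     digits = floor(log10(number)) + 1
--     return {number % 10 ** i * 10 ** (digits - i) + number // 10 ** i
--             for i in range(digits)}
-- ===== Notes on version B (the rewrite author's own statement) =====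
-- stated objective: alternative
-- what changed: B computes each of the d digit rotations independently from the original number with a closed-form divmod split at digit position i, inside a set comprehension, instead of A's stateful loop that repeatedly peels off the last digit and re-adds it at the front.
import Mathlib
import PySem

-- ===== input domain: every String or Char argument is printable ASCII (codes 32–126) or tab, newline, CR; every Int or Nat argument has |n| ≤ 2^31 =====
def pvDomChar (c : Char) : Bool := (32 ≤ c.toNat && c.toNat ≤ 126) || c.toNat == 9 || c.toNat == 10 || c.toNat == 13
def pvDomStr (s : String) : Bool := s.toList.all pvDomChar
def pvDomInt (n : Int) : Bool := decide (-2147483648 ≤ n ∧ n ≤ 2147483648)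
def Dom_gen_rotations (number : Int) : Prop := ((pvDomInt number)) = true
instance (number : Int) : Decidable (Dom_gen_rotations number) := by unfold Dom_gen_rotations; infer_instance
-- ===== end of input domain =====

-- B computes each digit rotation independently by a divmod closed form in a set
-- comprehension, instead of A's iterated mod/div/re-add state loop (objective: alternative).

-- ===== PORT A =====
-- helper: floor(log10(n))+1 = number of decimal digits; exact for 1 ≤ n ≤ 2^31
-- (doubles are exact for log10 on this range).  Both Pythons carry the same line.
def pyDigits (n : Nat) : Nat :=
  if n < 10 then 1
  else pyDigits (n / 10) + 1
decreasing_by exact Nat.div_lt_self (by omega) (by omega)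

def gen_rotations (number : Int) : List Int :=
  let digits := pyDigits number.toNat
  let st := (List.range digits).foldl
    (fun (st : Int × PySem.Set Int) _ =>
      let rotations := PySem.Set.add st.2 st.1
      let last := PySem.Int.mod st.1 10
      let number' := PySem.Int.floordiv st.1 10 + last * 10 ^ (digits - 1)
      (number', rotations))
    (number, PySem.Set.empty)
  st.2

-- ===== PORT B =====
def gen_rotations_alt (number : Int) : List Int :=
  let digits := pyDigits number.toNat
  PySem.Set.ofList ((List.range digits).map (fun i =>
    PySem.Int.mod number (10 ^ i) * 10 ^ (digits - i) + PySem.Int.floordiv number (10 ^ i)))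

-- ===== PRECONDITION & SPEC =====
-- Pre_ excludes number ≤ 0, on which A raises ValueError (math.log10 domain error).
def Pre_gen_rotations (number : Int) : Prop := 1 ≤ number
instance (number : Int) : Decidable (Pre_gen_rotations number) := by
  unfold Pre_gen_rotations; infer_instance

def pvWitness_gen_rotations : Int := (197)

def Spec_gen_rotations (number : Int) (out : List Int) : Prop := out = gen_rotations_alt number
instance (number : Int) (out : List Int) : Decidable (Spec_gen_rotations number out) := by
  unfold Spec_gen_rotations; infer_instance

-- ===== CLAIM (what is proved, stated in full; the proofs are below) =====
def Claim_equal_gen_rotations : Prop := ∀ (number : Int), Dom_gen_rotations number → Pre_gen_rotations number → Spec_gen_rotations number (gen_rotations number)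

-- ===== LEMMAS AND PROOFS =====

def pvClosed (n : Int) (d i : Nat) : Int :=
  PySem.Int.mod n (10 ^ i) * 10 ^ (d - i) + PySem.Int.floordiv n (10 ^ i)
def pvRot (d : Nat) (m : Int) : Int :=
  PySem.Int.floordiv m 10 + PySem.Int.mod m 10 * 10 ^ (d - 1)

theorem mydiv (a b q r : Int) (h1 : 0 ≤ r) (h2 : r < b) (h3 : a = b*q + r) : a / b = q ∧ a % b = r := by
  constructor
  · rw [h3, add_comm, Int.add_mul_ediv_left _ _ (by omega : b ≠ 0), Int.ediv_eq_zero_of_lt h1 h2]; ring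
  · rw [h3, add_comm, mul_comm]; simp [Int.emod_eq_of_lt h1 h2]

lemma pvRot_closed (n : Int) (hn : 0 ≤ n) (d i : Nat) (hid : i < d) :
    pvRot d (pvClosed n d i) = pvClosed n d (i + 1) := by
  have hP : (0:Int) < 10 ^ i := by positivity
  have e1 : PySem.Int.mod n (10 ^ i) = n % 10 ^ i := PySem.Int.mod_eq_emod_of_pos hP
  have e2 : PySem.Int.floordiv n (10 ^ i) = n / 10 ^ i := PySem.Int.floordiv_eq_ediv_of_pos hP
  have hP1 : (0:Int) < 10 ^ (i+1) := by positivity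
  have e3 : PySem.Int.mod n (10 ^ (i+1)) = n % 10 ^ (i+1) := PySem.Int.mod_eq_emod_of_pos hP1
  have e4 : PySem.Int.floordiv n (10 ^ (i+1)) = n / 10 ^ (i+1) := PySem.Int.floordiv_eq_ediv_of_pos hP1
  set P : Int := 10 ^ i with hPdef
  set q : Int := n / P with hq
  set r : Int := n % P with hr
  have hnqr : n = P * q + r := (Int.ediv_add_emod n P).symm
  have hr0 : 0 ≤ r := Int.emod_nonneg n (by omega)
  have hrP : r < P := Int.emod_lt_of_pos n hP
  have hq0 : 0 ≤ q := Int.ediv_nonneg hn (le_of_lt hP)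
  set t : Int := q % 10 with ht
  set q' : Int := q / 10 with hq'
  have hqt : q = 10 * q' + t := (Int.ediv_add_emod q 10).symm
  have ht0 : 0 ≤ t := Int.emod_nonneg q (by omega)
  have ht10 : t < 10 := Int.emod_lt_of_pos q (by omega)
  have hq'0 : 0 ≤ q' := Int.ediv_nonneg hq0 (by omega)
  -- closed(i) = 10 * (r * 10^(d-i-1) + q') + t
  have hclosed : pvClosed n d i = 10 * (r * 10 ^ (d - i - 1) + q') + t := by
    have hpow2 : (10:Int) ^ (d - i) = 10 ^ (d - i - 1) * 10 := by
      calc (10:Int) ^ (d - i) = 10 ^ (d - i - 1 + 1) := congrArg (fun e => (10:Int) ^ e) (by omega)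
        _ = 10 ^ (d - i - 1) * 10 := pow_succ 10 (d - i - 1)
    rw [pvClosed, e1, e2, hpow2]; linear_combination hqt
  have hm := mydiv (pvClosed n d i) 10 (r * 10 ^ (d - i - 1) + q') t ht0 ht10 (by rw [hclosed])
  -- n / 10^(i+1) = q'  and  n % 10^(i+1) = P * t + r
  have hPt0 : 0 ≤ P * t + r := by positivity
  have hPt10 : P * t + r < 10 ^ (i+1) := by
    rw [pow_succ]
    nlinarith
  have hn2 : n = 10 ^ (i+1) * q' + (P * t + r) := by rw [pow_succ, hPdef] at *; nlinarith [hnqr, hqt]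
  have hm2 := mydiv n (10 ^ (i+1)) q' (P * t + r) hPt0 hPt10 hn2
  have e5 : PySem.Int.floordiv (pvClosed n d i) 10 = pvClosed n d i / 10 :=
    PySem.Int.floordiv_eq_ediv_of_pos (by omega)
  have e6 : PySem.Int.mod (pvClosed n d i) 10 = pvClosed n d i % 10 :=
    PySem.Int.mod_eq_emod_of_pos (by omega)
  rw [pvRot, e5, e6, hm.1, hm.2, pvClosed, e3, e4, hm2.1, hm2.2]
  have hd1 : (d:Int) - 1 = (i:Int) + ((d:Int) - (i:Int) - 1) := by omega
  have hpow : (10:Int) ^ (d - 1) = P * 10 ^ (d - i - 1) := by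
    rw [hPdef, ← pow_add]; congr 1; omega
  have hsub : d - (i+1) = d - i - 1 := by omega
  rw [hsub, hpow]; ring

def pvIter (d : Nat) (m : Int) : Nat → Int
  | 0 => m
  | k + 1 => pvRot d (pvIter d m k)

lemma pvIter_eq_closed (n : Int) (hn : 0 ≤ n) (d : Nat) :
    ∀ i, i ≤ d → pvIter d n i = pvClosed n d i := by
  intro i
  induction i with
  | zero =>
      intro _
      simp [pvIter, pvClosed, PySem.Int.mod, PySem.Int.floordiv]
  | succ k ih =>
      intro hk
      rw [pvIter, ih (by omega), pvRot_closed n hn d k (by omega)]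

lemma pvFold_spec (d : Nat) (n : Int) :
    ∀ (k : Nat) (s : PySem.Set Int),
      (List.range k).foldl
        (fun (st : Int × PySem.Set Int) _ =>
          (PySem.Int.floordiv st.1 10 + PySem.Int.mod st.1 10 * 10 ^ (d - 1),
           PySem.Set.add st.2 st.1))
        (n, s)
      = (pvIter d n k, ((List.range k).map (fun j => pvIter d n j)).foldl PySem.Set.add s) := by
  intro k
  induction k with
  | zero => intro s; simp [pvIter]
  | succ m ih =>
      intro s
      rw [List.range_succ, List.foldl_append, ih, List.map_append, List.foldl_append]
      simp [pvIter, pvRot]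

-- ===== VERDICT (by name: the statement is the Claim_ definition above) =====
theorem gen_rotations_spec : Claim_equal_gen_rotations := by
  intro number _ hpre
  have hn : (0:Int) ≤ number := le_trans (by norm_num) hpre
  unfold Spec_gen_rotations gen_rotations gen_rotations_alt
  simp only []
  rw [pvFold_spec (pyDigits number.toNat) number (pyDigits number.toNat) PySem.Set.empty,
    PySem.Set.ofList_eq_foldl]
  dsimp only
  rw [show PySem.Set.empty = ([] : List Int) from rfl]
  congr 1
  apply List.map_congr_left
  intro j hj
  rw [pvIter_eq_closed number hn (pyDigits number.toNat) j
    (le_of_lt (List.mem_range.mp hj))]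
  rfl
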